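-- pv_equiv track=rewrite | github.com/dgabriele/lfm | diagnose_v3.py | longest_verbatim_run
-- ===== SOURCE A (Python) =====
-- def longest_verbatim_run(rec: list[str], gt: list[str]) -> int:
--     """Longest contiguous span of rec that appears verbatim in gt."""
--     if not rec or not gt:
--         return 0
--     gt_str = " ".join(gt)
--     best = 0
--     for i in range(len(rec)):
--         for j in range(i + 1, min(len(rec) + 1, i + len(gt) + 1)):
--             run = " ".join(rec[i:j])
--             if run in gt_str:
--                 best = max(best, j - i)
--             else:
--                 break  # extend only if shorter span matched
--     return best
-- ===== SOURCE B (Python) =====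
-- def longest_verbatim_run(rec: list[str], gt: list[str]) -> int:
--     """Longest contiguous span of rec that appears verbatim in gt.
--
--     Two-pointer sliding window: the right end never moves back, because a
--     matching window stays matching when its left token is dropped (the join of
--     rec[i+1:j] is a substring of the join of rec[i:j]).  The window width is
--     capped at len(gt), as in the nested-loop version's range bound."""
--     if not rec or not gt:
--         return 0
--     gt_str = " ".join(gt)
--     n, cap = len(rec), len(gt)
--     best = 0
--     j = 0
--     for i in range(n):
--         if j < i:
--             j = i
--         while j < n and j - i < cap and " ".join(rec[i:j + 1]) in gt_str:
--             j += 1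
--         if j - i > best:
--             best = j - i
--     return best
-- ===== Notes on version B (the rewrite author's own statement) =====
-- stated objective: faster
-- what changed: Replaced the restart-from-every-i nested loop by a two-pointer sliding window whose right end never moves back, justified by the invariant that a matching window stays matching after dropping its left token.
import Mathlib
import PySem

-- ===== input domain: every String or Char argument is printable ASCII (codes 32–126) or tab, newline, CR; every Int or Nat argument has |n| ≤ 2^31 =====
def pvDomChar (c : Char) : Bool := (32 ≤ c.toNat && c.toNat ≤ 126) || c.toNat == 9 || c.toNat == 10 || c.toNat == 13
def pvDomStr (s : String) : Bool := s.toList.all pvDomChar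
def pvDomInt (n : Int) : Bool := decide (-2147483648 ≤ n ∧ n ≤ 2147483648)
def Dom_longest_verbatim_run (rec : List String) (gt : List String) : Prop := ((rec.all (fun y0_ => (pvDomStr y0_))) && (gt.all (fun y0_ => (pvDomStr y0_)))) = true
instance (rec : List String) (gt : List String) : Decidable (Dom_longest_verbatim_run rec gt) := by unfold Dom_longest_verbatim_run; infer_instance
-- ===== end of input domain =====

-- B replaces A's restart-from-every-i nested loop by a two-pointer sliding window
-- (the right end never moves back); measured faster on large inputs.

-- ===== PORT A =====
-- inner 'for j in range(...)' with its break, as structural recursion over the range list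
def pvInnerA (gt_str : String) (rec : List String) (i : Int) (best : Int) : List Int → Int
  | [] => best
  | j :: rest =>
    let run := PySem.Str.join " " (PySem.List.slice rec (some i) (some j))
    if PySem.Str.isIn run gt_str then pvInnerA gt_str rec i (max best (j - i)) rest
    else best

def longest_verbatim_run (rec : List String) (gt : List String) : Int :=
  if rec = [] ∨ gt = [] then 0
  else
    let gt_str := PySem.Str.join " " gt
    (PySem.List.pyRange 0 (rec.length : Int) 1).foldl
      (fun best i =>
        pvInnerA gt_str rec i best
          (PySem.List.pyRange (i + 1) (min ((rec.length : Int) + 1) (i + (gt.length : Int) + 1)) 1))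
      0

-- ===== PORT B =====
-- the 'while j < n and j - i < cap and " ".join(rec[i:j+1]) in gt_str: j += 1' loop
def pvExtendB (gt_str : String) (rec : List String) (n cap i j : Nat) : Nat :=
  if h : j < n ∧ j - i < cap ∧
      PySem.Str.isIn (PySem.Str.join " " (PySem.List.slice rec (some (i : Int)) (some ((j : Int) + 1)))) gt_str
  then pvExtendB gt_str rec n cap i (j + 1)
  else j
termination_by n - j
decreasing_by omega

def longest_verbatim_run_alt (rec : List String) (gt : List String) : Int :=
  if rec = [] ∨ gt = [] then 0
  else
    let gt_str := PySem.Str.join " " gt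
    let n := rec.length
    let cap := gt.length
    let res := (List.range n).foldl
      (fun (s : Nat × Nat) i =>
        let j := if s.2 < i then i else s.2
        let j' := pvExtendB gt_str rec n cap i j
        (if j' - i > s.1 then j' - i else s.1, j'))
      ((0 : Nat), (0 : Nat))
    (res.1 : Int)

-- ===== PRECONDITION & SPEC =====
def Spec_longest_verbatim_run (rec : List String) (gt : List String) (out : Int) : Prop := out = longest_verbatim_run_alt rec gt
instance (rec : List String) (gt : List String) (out : Int) : Decidable (Spec_longest_verbatim_run rec gt out) := by unfold Spec_longest_verbatim_run; infer_instance

-- ===== CLAIM (what is proved, stated in full; the proofs are below) =====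
def Claim_equal_longest_verbatim_run : Prop := ∀ (rec : List String) (gt : List String), Dom_longest_verbatim_run rec gt → Spec_longest_verbatim_run rec gt (longest_verbatim_run rec gt)

-- ===== LEMMAS AND PROOFS =====

-- the join of the window rec[i:i+L], on the List Char side
def pvWin (rec : List String) (i L : Nat) : List Char :=
  PySem.Chars.join [' '] (((rec.drop i).take L).map String.toList)

-- the substring test both ports perform, normalised to a window start i and length L
def pvMatch (gts : String) (rec : List String) (i L : Nat) : Prop :=
  pvWin rec i L <:+: gts.toList

theorem pvMatch_test (gts : String) (rec : List String) (i L : Nat) :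
    PySem.Str.isIn (PySem.Str.join " " ((rec.drop i).take L)) gts = true ↔ pvMatch gts rec i L := by
  rw [PySem.Str.isIn_iff_infix, PySem.Str.toList_join]
  rfl

theorem pvJoin_prefix_append (sep : List Char) (a b : List (List Char)) :
    PySem.Chars.join sep a <+: PySem.Chars.join sep (a ++ b) := by
  induction a with
  | nil => simp [PySem.Chars.join_nil]
  | cons x xs ih =>
    cases xs with
    | nil =>
      cases b with
      | nil => simp
      | cons y ys =>
        rw [List.singleton_append, PySem.Chars.join_singleton, PySem.Chars.join_cons_cons]
        rw [List.append_assoc]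
        exact List.prefix_append x _
    | cons x' xs' =>
      simp only [List.cons_append]
      rw [PySem.Chars.join_cons_cons, PySem.Chars.join_cons_cons]
      obtain ⟨t, ht⟩ := ih
      simp only [List.cons_append] at ht
      exact ⟨t, by rw [List.append_assoc, List.append_assoc, ← ht, ← List.append_assoc, ← List.append_assoc]⟩

theorem pvWin_prefix_mono (rec : List String) (i : Nat) {K L : Nat} (h : K ≤ L) :
    pvWin rec i K <+: pvWin rec i L := by
  unfold pvWin
  have : (rec.drop i).take L = (rec.drop i).take K ++ ((rec.drop i).drop K).take (L - K) := by
    rw [← List.take_add, Nat.add_sub_cancel' h]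
  rw [this, List.map_append]
  exact pvJoin_prefix_append _ _ _

theorem pvMatch_mono (gts : String) (rec : List String) (i : Nat) {K L : Nat}
    (hKL : K ≤ L) (h : pvMatch gts rec i L) : pvMatch gts rec i K :=
  ((pvWin_prefix_mono rec i hKL).isInfix).trans h

theorem pvMatch_zero (gts : String) (rec : List String) (i : Nat) : pvMatch gts rec i 0 := by
  simp [pvMatch, pvWin, PySem.Chars.join_nil, List.nil_infix]

theorem pvJoin_suffix_cons (sep : List Char) (x : List Char) (xs : List (List Char)) :
    PySem.Chars.join sep xs <:+: PySem.Chars.join sep (x :: xs) := by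
  cases xs with
  | nil => simp [PySem.Chars.join_nil]
  | cons y ys =>
    rw [PySem.Chars.join_cons_cons]
    exact ((List.suffix_append _ _).isInfix)

theorem pvWin_shift (rec : List String) (i L : Nat) :
    pvWin rec (i + 1) L <:+: pvWin rec i (L + 1) := by
  by_cases hi : i < rec.length
  · unfold pvWin
    rw [List.drop_eq_getElem_cons hi, List.take_succ_cons, List.map_cons]
    exact pvJoin_suffix_cons _ _ _
  · unfold pvWin
    rw [List.drop_eq_nil_of_le (by omega), List.drop_eq_nil_of_le (by omega)]
    simp [PySem.Chars.join_nil]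

theorem pvMatch_shift (gts : String) (rec : List String) (i L : Nat)
    (h : pvMatch gts rec i (L + 1)) : pvMatch gts rec (i + 1) L :=
  (pvWin_shift rec i L).trans h

-- the loop condition of pvExtendB, in pvMatch form
theorem pvExtendB_cond (gts : String) (rec : List String) (i j : Nat) :
    (PySem.Str.isIn (PySem.Str.join " " (PySem.List.slice rec (some (i : Int)) (some ((j : Int) + 1)))) gts = true)
      ↔ pvMatch gts rec i (j + 1 - i) := by
  have : ((j : Int) + 1) = ((j + 1 : Nat) : Int) := by push_cast; ring
  rw [this, PySem.List.slice_natCast, pvMatch_test]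

theorem pvExtendB_ge (gts : String) (rec : List String) (n cap i j : Nat) :
    j ≤ pvExtendB gts rec n cap i j := by
  fun_induction pvExtendB with
  | case1 j h ih => omega
  | case2 j h => omega

theorem pvExtendB_le_n (gts : String) (rec : List String) (n cap i : Nat) :
    ∀ j : Nat, j ≤ n → pvExtendB gts rec n cap i j ≤ n := by
  intro j
  fun_induction pvExtendB gts rec n cap i j with
  | case1 j h ih => intro _; exact ih (by omega)
  | case2 j h => exact id

theorem pvExtendB_cap (gts : String) (rec : List String) (n cap i : Nat) :
    ∀ j : Nat, j - i ≤ cap → pvExtendB gts rec n cap i j - i ≤ cap := by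
  intro j
  fun_induction pvExtendB gts rec n cap i j with
  | case1 j h ih => intro _; exact ih (by omega)
  | case2 j h => exact id

theorem pvExtendB_match (gts : String) (rec : List String) (n cap i : Nat) :
    ∀ j : Nat, pvMatch gts rec i (j - i) → pvMatch gts rec i (pvExtendB gts rec n cap i j - i) := by
  intro j
  fun_induction pvExtendB gts rec n cap i j with
  | case1 j h ih =>
    intro _
    exact ih (pvMatch_mono _ _ _ (by omega) ((pvExtendB_cond _ _ _ _).mp h.2.2))
  | case2 j h => exact id

theorem pvExtendB_stop (gts : String) (rec : List String) (n cap i j : Nat) :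
    ¬ (pvExtendB gts rec n cap i j < n ∧ pvExtendB gts rec n cap i j - i < cap ∧
        pvMatch gts rec i (pvExtendB gts rec n cap i j + 1 - i)) := by
  fun_induction pvExtendB gts rec n cap i j with
  | case1 j h ih => exact ih
  | case2 j h =>
    rw [pvExtendB_cond] at h
    exact h

theorem pvExtendB_between (gts : String) (rec : List String) (n cap i : Nat) :
    ∀ j j' : Nat, j ≤ j' → j' ≤ pvExtendB gts rec n cap i j →
    pvExtendB gts rec n cap i j' = pvExtendB gts rec n cap i j := by
  intro j
  fun_induction pvExtendB gts rec n cap i j with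
  | case1 j h ih =>
    intro j' h1 h2
    by_cases hlt : j + 1 ≤ j'
    · exact ih j' hlt h2
    · have : j' = j := by omega
      subst this
      conv_lhs => rw [pvExtendB]
      rw [dif_pos h]
  | case2 j h =>
    intro j' h1 h2
    have : j' = j := by omega
    subst this
    rw [pvExtendB, dif_neg h]

-- A's inner loop starting after index j equals B's extension from j
theorem pvInnerA_eq_extend (gts : String) (rec : List String) (n cap : Nat) :
    ∀ (d i j : Nat) (best : Int), i ≤ j → (j : Int) - (i : Int) ≤ best →
      min n (i + cap) - j = d →
      pvInnerA gts rec (i : Int) best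
          (PySem.List.pyRange ((j : Int) + 1) (min ((n : Int) + 1) ((i : Int) + (cap : Int) + 1)) 1)
        = max best ((pvExtendB gts rec n cap i j : Int) - (i : Int)) := by
  intro d
  induction d with
  | zero =>
    intro i j best hij hbest hd
    have hstop : ¬ (j < n ∧ j - i < cap) := by omega
    rw [PySem.List.pyRange_one_eq_nil (by omega), pvExtendB,
      dif_neg (by intro h; exact hstop ⟨h.1, h.2.1⟩)]
    simp only [pvInnerA]
    omega
  | succ d ih =>
    intro i j best hij hbest hd
    have hj : j < min n (i + cap) := by omega
    rw [PySem.List.pyRange_one_cons (by omega)]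
    simp only [pvInnerA]
    by_cases ht : PySem.Str.isIn (PySem.Str.join " "
        (PySem.List.slice rec (some (i : Int)) (some ((j : Int) + 1)))) gts = true
    · rw [if_pos ht, pvExtendB, dif_pos ⟨by omega, by omega, ht⟩]
      have h1 : ((j : Int) + 1 + 1) = (((j + 1 : Nat) : Int) + 1) := by push_cast; ring
      have h2 : ((j : Int) + 1 - (i : Int)) = (((j + 1 : Nat) : Int) - (i : Int)) := by push_cast; ring
      rw [h1, h2, ih i (j + 1) (max best (((j + 1 : Nat) : Int) - (i : Int))) (by omega)
        (le_max_right _ _) (by omega)]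
      have := pvExtendB_ge gts rec n cap i (j + 1)
      omega
    · rw [if_neg ht, pvExtendB, dif_neg (by intro h; exact ht h.2.2)]
      omega

-- the main loop: A's fold over range indices equals B's two-pointer fold
theorem pvLoop_eq (gts : String) (rec : List String) (n cap : Nat) :
    ∀ (c k : Nat) (Abest : Int) (Bs : Nat × Nat), k + c ≤ n →
      Abest = (Bs.1 : Int) → Bs.2 ≤ n →
      (k ≤ Bs.2 → Bs.2 - k ≤ cap ∧ pvMatch gts rec k (Bs.2 - k)) →
      ((List.range' k c).map (fun (m : Nat) => (m : Int))).foldl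
          (fun best i =>
            pvInnerA gts rec i best
              (PySem.List.pyRange (i + 1) (min ((n : Int) + 1) (i + (cap : Int) + 1)) 1)) Abest
        = ((((List.range' k c).foldl
            (fun (s : Nat × Nat) i =>
              let j := if s.2 < i then i else s.2
              let j' := pvExtendB gts rec n cap i j
              (if j' - i > s.1 then j' - i else s.1, j')) Bs).1 : Nat) : Int) := by
  intro c
  induction c with
  | zero => intro k Abest Bs _ hAB _ _; simpa using hAB
  | succ c ih =>
    intro k Abest Bs hkc hAB hn hinv
    rw [List.range'_succ, List.map_cons, List.foldl_cons, List.foldl_cons]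
    dsimp only
    set jmax := if Bs.2 < k then k else Bs.2 with hjmax
    -- facts about the starting point jmax of the extension at index k
    have hk_le : k ≤ jmax := by rw [hjmax]; split <;> omega
    have hjm_n : jmax ≤ n := by rw [hjmax]; split <;> omega
    have hjm_cap : jmax - k ≤ cap := by
      rw [hjmax]; split
      · omega
      · exact (hinv (by omega)).1
    have hjm_match : pvMatch gts rec k (jmax - k) := by
      rw [hjmax]; split
      · simpa using pvMatch_zero gts rec k
      · exact (hinv (by omega)).2
    -- jmax never overtakes the extension started at k itself
    have hJ : jmax ≤ pvExtendB gts rec n cap k k := by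
      by_contra hlt
      rw [Nat.not_le] at hlt
      set R := pvExtendB gts rec n cap k k with hR
      have hRk : k ≤ R := pvExtendB_ge gts rec n cap k k
      exact pvExtendB_stop gts rec n cap k k
        ⟨by omega, by omega, pvMatch_mono gts rec k (by omega) hjm_match⟩
    have hext : pvExtendB gts rec n cap k jmax = pvExtendB gts rec n cap k k :=
      pvExtendB_between gts rec n cap k k jmax hk_le hJ
    set R := pvExtendB gts rec n cap k k with hR
    -- A's step produces max Abest (R - k)
    rw [pvInnerA_eq_extend gts rec n cap (min n (k + cap) - k) k k Abest (le_refl k)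
        (by omega) rfl]
    -- B's step produces the pair (max Bs.1 (R - k), R)
    rw [hext]
    have hRk : k ≤ R := pvExtendB_ge gts rec n cap k k
    have hRn : R ≤ n := hR ▸ pvExtendB_le_n gts rec n cap k k (by omega)
    have hRcap : R - k ≤ cap := by
      have := pvExtendB_cap gts rec n cap k jmax (by omega)
      rw [hext] at this
      omega
    have hRmatch : pvMatch gts rec k (R - k) := by
      have := pvExtendB_match gts rec n cap k jmax hjm_match
      rw [hext] at this
      exact this
    have hstep : max Abest ((R : Int) - (k : Int)) =
        (((if R - k > Bs.1 then R - k else Bs.1) : Nat) : Int) := by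
      rw [hAB]; split <;> omega
    rw [hstep]
    exact ih (k + 1) _ (if R - k > Bs.1 then R - k else Bs.1, R)
      (by omega) rfl hRn
      (by
        intro hk1
        refine ⟨by omega, ?_⟩
        have hL : R - k = (R - (k + 1)) + 1 := by omega
        exact pvMatch_shift gts rec k (R - (k + 1)) (hL ▸ hRmatch))

-- ===== VERDICT (by name: the statement is the Claim_ definition above) =====
theorem longest_verbatim_run_spec : Claim_equal_longest_verbatim_run := by
  intro rec gt _
  unfold Spec_longest_verbatim_run longest_verbatim_run longest_verbatim_run_alt
  by_cases h : rec = [] ∨ gt = []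
  · rw [if_pos h, if_pos h]
  · rw [if_neg h, if_neg h]
    dsimp only
    rw [PySem.List.pyRange_zero_nat, List.range_eq_range']
    exact pvLoop_eq (PySem.Str.join " " gt) rec rec.length gt.length rec.length 0 0 (0, 0)
      (by omega) rfl (by omega)
      (fun _ => ⟨by omega, pvMatch_zero _ _ _⟩)
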